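-- pv_equiv track=rewrite | github.com/Celande/adventofcode2019 | day4/puzzle2.py | are_doubles_matching
-- ===== SOURCE A (Python) =====
-- def are_doubles_matching(nb):
--     # checking that there is at least one double digits
--     # and that there is at least one double digit not
--     # in a bigger group
--     string = str(nb)
--     array = []
--     tmp = string[0]
--     for now in string[1:]:
--         if tmp[0] == now:
--             tmp += now
--         else:
--             array.append(tmp)
--             tmp = now
--     array.append(tmp)
--
--     for i in array:
--         if len(i) == 2:
--             return True
--     return False
-- ===== SOURCE B (Python) =====
-- def are_doubles_matching(nb):
--     # single pass over the digit string keeping only the current run length;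
--     # no list of groups is ever built
--     s = str(nb)
--     run = 1
--     prev = s[0]
--     for c in s[1:]:
--         if c == prev:
--             run += 1
--         else:
--             if run == 2:
--                 return True
--             run = 1
--         prev = c
--     return run == 2
-- ===== Notes on version B (the rewrite author's own statement) =====
-- stated objective: simpler
-- what changed: B replaces A's two-phase build-a-list-of-runs-then-scan with a single pass that keeps only the current run length and its last character, returning True as soon as a run closes at length 2.
import Mathlib
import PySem

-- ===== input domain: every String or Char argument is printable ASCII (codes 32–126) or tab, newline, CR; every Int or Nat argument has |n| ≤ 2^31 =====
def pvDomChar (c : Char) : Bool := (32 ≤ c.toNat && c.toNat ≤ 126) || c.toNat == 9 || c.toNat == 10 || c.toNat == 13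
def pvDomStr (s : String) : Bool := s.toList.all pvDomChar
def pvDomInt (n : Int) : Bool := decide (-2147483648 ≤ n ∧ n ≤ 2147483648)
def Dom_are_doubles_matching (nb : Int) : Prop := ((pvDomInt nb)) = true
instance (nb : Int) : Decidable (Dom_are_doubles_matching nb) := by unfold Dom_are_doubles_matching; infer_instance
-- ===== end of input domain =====

-- B changes the decomposition: one pass with a run-length counter instead of building a list of run strings; return value only, no speed claim.

-- ===== PORT A =====
-- builds the list of maximal runs: tmp is the current run (nonempty), arr the finished runs
def pvAGroups : List Char → List Char → List (List Char) → List (List Char)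
  | tmp, [], arr => arr ++ [tmp]
  | tmp, now :: rest, arr =>
    if tmp.head? = some now then pvAGroups (tmp ++ [now]) rest arr
    else pvAGroups [now] rest (arr ++ [tmp])

def are_doubles_matching (nb : Int) : Bool :=
  -- string = str(nb); tmp = string[0] (str(nb) is never empty, so the [] case is unreachable)
  match (PySem.Int.toStr nb).toList with
  | [] => false
  | c :: rest => (pvAGroups [c] rest []).any (fun g => g.length == 2)

-- ===== PORT B =====
-- single pass: prev = previous char, run = current run length
def pvBLoop : Char → Nat → List Char → Bool
  | _, run, [] => run == 2
  | prev, run, c :: rest =>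
    if c = prev then pvBLoop c (run + 1) rest
    else if run == 2 then true
    else pvBLoop c 1 rest

def are_doubles_matching_alt (nb : Int) : Bool :=
  match (PySem.Int.toStr nb).toList with
  | [] => false
  | c :: rest => pvBLoop c 1 rest

-- ===== PRECONDITION & SPEC =====
def Spec_are_doubles_matching (nb : Int) (out : Bool) : Prop := out = are_doubles_matching_alt nb
instance (nb : Int) (out : Bool) : Decidable (Spec_are_doubles_matching nb out) := by unfold Spec_are_doubles_matching; infer_instance

-- ===== CLAIM (what is proved, stated in full; the proofs are below) =====
def Claim_equal_are_doubles_matching : Prop := ∀ (nb : Int), Dom_are_doubles_matching nb → Spec_are_doubles_matching nb (are_doubles_matching nb)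

-- ===== LEMMAS AND PROOFS =====

-- invariant: when the current run is `run+1` copies of `c`, A's finished scan over `arr ++ rest's groups`
-- equals `arr`'s scan or-ed with B's loop carrying (c, run+1)
theorem pvGroups_eq_loop (rest : List Char) : ∀ (c : Char) (run : Nat) (arr : List (List Char)),
    (pvAGroups (List.replicate (run + 1) c) rest arr).any (fun g => g.length == 2)
      = (arr.any (fun g => g.length == 2) || pvBLoop c (run + 1) rest) := by
  induction rest with
  | nil =>
    intro c run arr
    simp [pvAGroups, pvBLoop]
  | cons now rest ih =>
    intro c run arr
    by_cases h : now = c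
    · subst h
      have h1 : (List.replicate (run + 1) now).head? = some now := by
        simp [List.replicate]
      have h2 : List.replicate (run + 1) now ++ [now] = List.replicate (run + 1 + 1) now := by
        simp [List.replicate_succ' (n := run + 1)]
      simp only [pvAGroups, h1, h2, pvBLoop]
      exact ih now (run + 1) arr
    · have h1 : ¬ ((List.replicate (run + 1) c).head? = some now) := by
        simp only [List.replicate, List.head?_cons, Option.some.injEq]
        exact fun he => h he.symm
      have h2 : [now] = List.replicate (0 + 1) now := by simp
      simp only [pvAGroups, if_neg h1, h2]
      rw [ih now 0 (arr ++ [List.replicate (run + 1) c])]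
      simp only [pvBLoop, if_neg h]
      by_cases hr : run + 1 = 2
      · simp [hr]
      · have hb : ((run + 1 : Nat) == 2) = decide (run + 1 = 2) := by
          by_cases hx : run + 1 = 2 <;> simp [hx] <;> omega
        simp [List.any_append, hb, hr]

-- ===== VERDICT (by name: the statement is the Claim_ definition above) =====
theorem are_doubles_matching_spec : Claim_equal_are_doubles_matching := by
  intro nb _
  unfold Spec_are_doubles_matching
  show are_doubles_matching nb = are_doubles_matching_alt nb
  unfold are_doubles_matching are_doubles_matching_alt
  cases (PySem.Int.toStr nb).toList with
  | nil => rfl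
  | cons c rest =>
    show (pvAGroups [c] rest []).any (fun g => g.length == 2) = pvBLoop c 1 rest
    have h1 : [c] = List.replicate (0 + 1) c := by simp
    rw [h1, pvGroups_eq_loop rest c 0 []]
    simp
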